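-- pv_equiv track=rewrite | github.com/patrick-winter-kn/mol-struct-nets | molstructnets/util/misc.py | substring_cut_from_middle
-- ===== SOURCE A (Python) =====
-- def substring_cut_from_middle(string, slices):
--     removed = 0
--     for slice_ in slices:
--         cut_start = slice_[0] - removed
--         cut_end = slice_[1] - removed
--         string = string[:cut_start] + string[cut_end:]
--         removed += slice_[1] - slice_[0]
--     return string
-- ===== SOURCE B (Python) =====
-- def _clamp(i, L):
--     if i < 0:
--         i += L
--     return 0 if i < 0 else (L if i > L else i)
--
--
-- def _take(segs, k):
--     out = []
--     for s, e in segs: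
--         if k <= 0:
--             break
--         if e - s <= k:
--             out.append((s, e))
--             k -= e - s
--         else:
--             out.append((s, s + k))
--             k = 0
--     return out
--
--
-- def _drop(segs, k):
--     out = []
--     for s, e in segs:
--         if k >= e - s:
--             k -= e - s
--         else:
--             out.append((s + k, e))
--             k = 0
--     return out
--
--
-- def substring_cut_from_middle(string, slices):
--     # Represent the evolving string as a list of index intervals into the
--     # original string; cut intervals and join the survivors once at the end.
--     L = len(string)
--     segs = [(0, L)]
--     removed = 0
--     for slice_ in slices:
--         a = _clamp(slice_[0] - removed, L)
--         b = _clamp(slice_[1] - removed, L)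
--         removed += slice_[1] - slice_[0]
--         segs = _take(segs, a) + _drop(segs, b)
--         L = a + (L - b)
--     return ''.join(string[s:e] for s, e in segs)
-- ===== Notes on version B (the rewrite author's own statement) =====
-- stated objective: alternative
-- what changed: B represents the evolving string as a list of index intervals into the original string and cuts intervals (tracking the current length incrementally), joining the surviving segments once at the end, instead of rebuilding the whole string by slice-and-concatenate at every step.
import Mathlib
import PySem

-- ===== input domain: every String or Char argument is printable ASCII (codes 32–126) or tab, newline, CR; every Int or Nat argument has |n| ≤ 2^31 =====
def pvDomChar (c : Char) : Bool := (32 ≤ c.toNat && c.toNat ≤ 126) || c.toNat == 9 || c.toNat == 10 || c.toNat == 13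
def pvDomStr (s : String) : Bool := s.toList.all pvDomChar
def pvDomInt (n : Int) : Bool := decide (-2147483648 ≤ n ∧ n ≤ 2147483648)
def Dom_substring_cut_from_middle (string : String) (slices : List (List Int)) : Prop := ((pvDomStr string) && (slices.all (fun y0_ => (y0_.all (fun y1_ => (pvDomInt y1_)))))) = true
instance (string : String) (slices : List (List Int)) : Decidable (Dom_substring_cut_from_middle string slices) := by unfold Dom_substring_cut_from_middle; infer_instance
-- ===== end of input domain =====

-- B replaces A's per-slice slice-and-concatenate rebuilding by cutting a list of
-- index intervals into the original string, joining the survivors once (objective: alternative).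

-- ===== PORT A =====
-- loop over slices; the string is carried as its list of code points
def pvLoopA : List (List Int) → List Char → Int → List Char
  | [], s, _ => s
  | sl :: rest, s, removed =>
    match PySem.List.pyGet? sl 0, PySem.List.pyGet? sl 1 with
    | some s0, some s1 =>
      let cut_start := s0 - removed
      let cut_end := s1 - removed
      pvLoopA rest (PySem.List.slice s none (some cut_start) ++ PySem.List.slice s (some cut_end) none) (removed + (s1 - s0))
    | _, _ => s  -- Python raises IndexError here (excluded by Pre_)

def substring_cut_from_middle (string : String) (slices : List (List Int)) : String :=
  String.ofList (pvLoopA slices string.toList 0)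

-- ===== PORT B =====
-- helper _clamp of Source B
def pvClamp (i : Int) (L : Nat) : Nat :=
  let i' := if i < 0 then i + L else i
  if i' < 0 then 0 else if (L : Int) < i' then L else i'.toNat

-- sum(e - s for s, e in segs)
def pvSegLen : List (Nat × Nat) → Nat
  | [] => 0
  | (s, e) :: rest => (e - s) + pvSegLen rest

-- helper _take of Source B
def pvSegTake : Nat → List (Nat × Nat) → List (Nat × Nat)
  | _, [] => []
  | k, (s, e) :: rest =>
    if k = 0 then []
    else if e - s ≤ k then (s, e) :: pvSegTake (k - (e - s)) rest
    else [(s, s + k)]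

-- helper _drop of Source B
def pvSegDrop : Nat → List (Nat × Nat) → List (Nat × Nat)
  | _, [] => []
  | k, (s, e) :: rest =>
    if e - s ≤ k then pvSegDrop (k - (e - s)) rest
    else (s + k, e) :: pvSegDrop 0 rest

-- main loop of Source B over the interval list
def pvLoopB : List (List Int) → List (Nat × Nat) → Int → List (Nat × Nat)
  | [], segs, _ => segs
  | sl :: rest, segs, removed =>
    match PySem.List.pyGet? sl 0, PySem.List.pyGet? sl 1 with
    | some s0, some s1 =>
      let L := pvSegLen segs
      let a := pvClamp (s0 - removed) L
      let b := pvClamp (s1 - removed) L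
      pvLoopB rest (pvSegTake a segs ++ pvSegDrop b segs) (removed + (s1 - s0))
    | _, _ => segs  -- Python raises IndexError here (excluded by Pre_)

def substring_cut_from_middle_alt (string : String) (slices : List (List Int)) : String :=
  let cs := string.toList
  String.ofList ((pvLoopB slices [(0, cs.length)] 0).flatMap (fun p => (cs.drop p.1).take (p.2 - p.1)))

-- ===== PRECONDITION & SPEC =====
-- Python A raises IndexError on any slice with fewer than 2 elements; Pre_ excludes exactly those inputs.
def Pre_substring_cut_from_middle (string : String) (slices : List (List Int)) : Prop :=
  ∀ sl ∈ slices, 2 ≤ sl.length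
instance (string : String) (slices : List (List Int)) : Decidable (Pre_substring_cut_from_middle string slices) := by unfold Pre_substring_cut_from_middle; infer_instance

def pvWitness_substring_cut_from_middle : String × List (List Int) := ("abcdef", [[1, 3], [2, 4]])

def Spec_substring_cut_from_middle (string : String) (slices : List (List Int)) (out : String) : Prop := out = substring_cut_from_middle_alt string slices
instance (string : String) (slices : List (List Int)) (out : String) : Decidable (Spec_substring_cut_from_middle string slices out) := by unfold Spec_substring_cut_from_middle; infer_instance

-- ===== CLAIM (what is proved, stated in full; the proofs are below) =====
def Claim_equal_substring_cut_from_middle : Prop := ∀ (string : String) (slices : List (List Int)), Dom_substring_cut_from_middle string slices → Pre_substring_cut_from_middle string slices → Spec_substring_cut_from_middle string slices (substring_cut_from_middle string slices)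

-- ===== LEMMAS AND PROOFS =====

-- the string denoted by an interval list
def pvConcat (cs : List Char) (segs : List (Nat × Nat)) : List Char :=
  segs.flatMap (fun p => (cs.drop p.1).take (p.2 - p.1))

-- well-formed intervals
def pvGood (n : Nat) (segs : List (Nat × Nat)) : Prop :=
  ∀ p ∈ segs, p.1 ≤ p.2 ∧ p.2 ≤ n

theorem pvClamp_eq_clampIdx (i : Int) (n : Nat) : pvClamp i n = PySem.List.clampIdx n i := by
  rcases (by omega : 0 ≤ i ∨ i < 0) with h | h
  · obtain ⟨k, rfl⟩ : ∃ k : Nat, i = (k : Int) := ⟨i.toNat, (Int.toNat_of_nonneg h).symm⟩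
    rw [PySem.List.clampIdx_natCast]
    simp only [pvClamp]
    split_ifs <;> omega
  · obtain ⟨k, hk, rfl⟩ : ∃ k : Nat, 0 < k ∧ i = -(k : Int) := ⟨(-i).toNat, by omega, by omega⟩
    rw [PySem.List.clampIdx_neg_natCast n k hk]
    simp only [pvClamp]
    split_ifs <;> omega

theorem pvSlice_to (s : List Char) (b : Int) :
    PySem.List.slice s none (some b) = s.take (pvClamp b s.length) := by
  rcases (by omega : 0 ≤ b ∨ b < 0) with h | h
  · rw [PySem.List.slice_to s h]
    have hc : pvClamp b s.length = min b.toNat s.length := by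
      simp only [pvClamp]; split_ifs <;> omega
    rw [hc]
    rcases le_total b.toNat s.length with h2 | h2
    · rw [Nat.min_eq_left h2]
    · rw [Nat.min_eq_right h2, List.take_of_length_le h2, List.take_length]
  · obtain ⟨k, hk, rfl⟩ : ∃ k : Nat, 0 < k ∧ b = -(k : Int) := ⟨(-b).toNat, by omega, by omega⟩
    rw [PySem.List.slice_to_neg_natCast s k hk]
    have hc : pvClamp (-(k : Int)) s.length = s.length - k := by
      simp only [pvClamp]; split_ifs <;> omega
    rw [hc]

theorem pvSlice_from (s : List Char) (a : Int) :
    PySem.List.slice s (some a) none = s.drop (pvClamp a s.length) := by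
  rw [PySem.List.slice_some_none, pvClamp_eq_clampIdx]

theorem pvConcat_cons (cs : List Char) (p : Nat × Nat) (rest : List (Nat × Nat)) :
    pvConcat cs (p :: rest) = (cs.drop p.1).take (p.2 - p.1) ++ pvConcat cs rest := by
  simp [pvConcat]

theorem pvConcat_append (cs : List Char) (l1 l2 : List (Nat × Nat)) :
    pvConcat cs (l1 ++ l2) = pvConcat cs l1 ++ pvConcat cs l2 := by
  simp [pvConcat]

theorem pvPiece_len (cs : List Char) (s e : Nat) (h1 : s ≤ e) (h2 : e ≤ cs.length) :
    ((cs.drop s).take (e - s)).length = e - s := by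
  simp only [List.length_take, List.length_drop]
  omega

theorem pvConcat_len (cs : List Char) (segs : List (Nat × Nat)) (h : pvGood cs.length segs) :
    (pvConcat cs segs).length = pvSegLen segs := by
  induction segs with
  | nil => simp [pvConcat, pvSegLen]
  | cons p rest ih =>
    obtain ⟨s, e⟩ := p
    obtain ⟨h1, h2⟩ := h (s, e) (by simp)
    have hrest : pvGood cs.length rest := fun q hq => h q (by simp [hq])
    rw [pvConcat_cons, List.length_append, ih hrest, pvSegLen,
      pvPiece_len cs s e h1 h2]

theorem pvGood_take (n k : Nat) (segs : List (Nat × Nat)) (h : pvGood n segs) :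
    pvGood n (pvSegTake k segs) := by
  induction segs generalizing k with
  | nil => intro p hp; simp [pvSegTake] at hp
  | cons q rest ih =>
    obtain ⟨s, e⟩ := q
    obtain ⟨h1, h2⟩ := h (s, e) (by simp)
    have hrest : pvGood n rest := fun q hq => h q (by simp [hq])
    intro p hp
    simp only [pvSegTake] at hp
    split_ifs at hp with hk hle
    · simp at hp
    · rcases List.mem_cons.mp hp with rfl | hp
      · exact ⟨h1, h2⟩
      · exact ih (k - (e - s)) hrest p hp
    · simp at hp
      subst hp
      constructor <;> simp <;> omega

theorem pvGood_drop (n k : Nat) (segs : List (Nat × Nat)) (h : pvGood n segs) :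
    pvGood n (pvSegDrop k segs) := by
  induction segs generalizing k with
  | nil => intro p hp; simp [pvSegDrop] at hp
  | cons q rest ih =>
    obtain ⟨s, e⟩ := q
    obtain ⟨h1, h2⟩ := h (s, e) (by simp)
    have hrest : pvGood n rest := fun q hq => h q (by simp [hq])
    intro p hp
    simp only [pvSegDrop] at hp
    split_ifs at hp with hle
    · exact ih (k - (e - s)) hrest p hp
    · rcases List.mem_cons.mp hp with rfl | hp
      · constructor <;> simp <;> omega
      · exact ih 0 hrest p hp

theorem pvConcat_take (cs : List Char) (k : Nat) (segs : List (Nat × Nat)) (h : pvGood cs.length segs) :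
    pvConcat cs (pvSegTake k segs) = (pvConcat cs segs).take k := by
  induction segs generalizing k with
  | nil => simp [pvSegTake, pvConcat]
  | cons q rest ih =>
    obtain ⟨s, e⟩ := q
    obtain ⟨h1, h2⟩ := h (s, e) (by simp)
    have hrest : pvGood cs.length rest := fun q hq => h q (by simp [hq])
    have hplen := pvPiece_len cs s e h1 h2
    rw [pvConcat_cons, List.take_append, hplen]
    simp only [pvSegTake]
    split_ifs with hk hle
    · subst hk; simp [pvConcat]
    · rw [pvConcat_cons, ih (k - (e - s)) hrest,
        List.take_of_length_le (by omega : ((cs.drop s).take (e - s)).length ≤ k)]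
    · have h0 : k - (e - s) = 0 := by omega
      rw [h0]
      simp only [List.take_zero, List.append_nil]
      rw [pvConcat_cons, pvConcat, List.flatMap_nil, List.append_nil]
      rw [List.take_take]
      congr 1
      omega

theorem pvConcat_drop (cs : List Char) (k : Nat) (segs : List (Nat × Nat)) (h : pvGood cs.length segs) :
    pvConcat cs (pvSegDrop k segs) = (pvConcat cs segs).drop k := by
  induction segs generalizing k with
  | nil => simp [pvSegDrop, pvConcat]
  | cons q rest ih =>
    obtain ⟨s, e⟩ := q
    obtain ⟨h1, h2⟩ := h (s, e) (by simp)
    have hrest : pvGood cs.length rest := fun q hq => h q (by simp [hq])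
    have hplen := pvPiece_len cs s e h1 h2
    rw [pvConcat_cons, List.drop_append, hplen]
    simp only [pvSegDrop]
    split_ifs with hle
    · rw [ih (k - (e - s)) hrest,
        List.drop_of_length_le (by omega : ((cs.drop s).take (e - s)).length ≤ k)]
      simp
    · have h0 : k - (e - s) = 0 := by omega
      rw [h0]
      simp only [List.drop_zero]
      rw [pvConcat_cons, ih 0 hrest]
      simp only [List.drop_zero]
      rw [List.drop_take, List.drop_drop, Nat.sub_sub]

theorem pvMain (cs : List Char) (slices : List (List Int)) :
    ∀ (segs : List (Nat × Nat)) (removed : Int), pvGood cs.length segs →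
      pvLoopA slices (pvConcat cs segs) removed = pvConcat cs (pvLoopB slices segs removed) := by
  induction slices with
  | nil => intro segs removed _; rfl
  | cons sl rest ih =>
    intro segs removed hgood
    cases h0 : PySem.List.pyGet? sl 0 with
    | none => simp only [pvLoopA, pvLoopB, h0]
    | some s0 =>
      cases h1 : PySem.List.pyGet? sl 1 with
      | none => simp only [pvLoopA, pvLoopB, h0, h1]
      | some s1 =>
        simp only [pvLoopA, pvLoopB, h0, h1]
        have hL : pvSegLen segs = (pvConcat cs segs).length := (pvConcat_len cs segs hgood).symm
        set a := pvClamp (s0 - removed) (pvConcat cs segs).length with ha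
        set b := pvClamp (s1 - removed) (pvConcat cs segs).length with hb
        have hgood' : pvGood cs.length (pvSegTake a segs ++ pvSegDrop b segs) := by
          intro p hp
          rcases List.mem_append.mp hp with hp | hp
          · exact pvGood_take cs.length a segs hgood p hp
          · exact pvGood_drop cs.length b segs hgood p hp
        rw [hL, pvSlice_to, pvSlice_from, ← ha, ← hb,
          ← pvConcat_take cs a segs hgood, ← pvConcat_drop cs b segs hgood,
          ← pvConcat_append]
        exact ih (pvSegTake a segs ++ pvSegDrop b segs) (removed + (s1 - s0)) hgood'

-- ===== VERDICT (by name: the statement is the Claim_ definition above) =====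
theorem pvConcat_full (cs : List Char) : pvConcat cs [(0, cs.length)] = cs := by
  simp [pvConcat]

theorem substring_cut_from_middle_spec : Claim_equal_substring_cut_from_middle := by
  intro string slices _ _
  unfold Spec_substring_cut_from_middle substring_cut_from_middle substring_cut_from_middle_alt
  have hgood : pvGood string.toList.length [(0, string.toList.length)] := by
    intro p hp; simp at hp; subst hp; simp
  have := pvMain string.toList slices [(0, string.toList.length)] 0 hgood
  rw [pvConcat_full] at this
  rw [this]
  rfl
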